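-- pv_equiv track=rewrite | github.com/pavelrevak/highlight | highlight/__init__.py | action_decode
-- ===== SOURCE A (Python) =====
-- COLORS = {
--     'default': '\033[0m',
--     'black': '\033[30m',
--     'red': '\033[31m',
--     'yellow': '\033[33m',
--     'green': '\033[32m',
--     'cyan': '\033[36m',
--     'blue': '\033[34m',
--     'magenta': '\033[35m',
--     'pink': '\033[35m',
--     'white': '\033[37m',
--
--     'gray': '\033[90m',
--     'lred': '\033[91m',
--     'lyellow': '\033[93m',
--     'lgreen': '\033[92m',
--     'lcyan': '\033[96m',
--     'lblue': '\033[94m',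
--     'lmagenta': '\033[95m',
--     'lpink': '\033[95m',
--     'lwhite': '\033[97m',
--
--     'iblack': '\033[40m\033[97m',
--     'ired': '\033[41m\033[97m',
--     'iyellow': '\033[43m\033[97m',
--     'igreen': '\033[42m\033[97m',
--     'icyan': '\033[46m\033[97m',
--     'iblue': '\033[44m\033[97m',
--     'imagenta': '\033[45m\033[97m',
--     'ipink': '\033[45m\033[97m',
--     'iwhite': '\033[47m\033[30m',
--
--     'igray': '\033[100m\033[97m',
--     'ilred': '\033[101m\033[30m',
--     'ilyellow': '\033[103m\033[30m',
--     'ilgreen': '\033[102m\033[30m',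
--     'ilcyan': '\033[106m\033[30m',
--     'ilblue': '\033[104m\033[30m',
--     'ilmagenta': '\033[105m\033[30m',
--     'ilpink': '\033[105m\033[30m',
--     'ilwhite': '\033[107m\033[30m',
-- }
--
-- class UnknowColor(Exception):
--     """Unknown color error"""
--     def __init__(self, color):
--         super().__init__("Unknown color: " + color)
--
-- def get_color(color):
--     """Return color value based on color name"""
--     for name, value in COLORS.items():
--         if name.startswith(color.lower()):
--             return value
--     raise UnknowColor(color)
--
-- def action_decode(actions):
--     """Decode actions for line or word highlighting"""
--     color_map = {}
--     for color, pattern in actions: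
--         color_value = get_color(color)
--         if color_value not in color_map:
--             color_map[color_value] = [pattern]
--         else:
--             color_map[color_value].append(pattern)
--     return color_map
-- ===== SOURCE B (Python) =====
-- # B: color table kept as numeric SGR codes (values built as "\033[<n>m" joins), resolution by a
-- # scan over that code table, and grouping by resolve-all / dedup-keys / filter instead of A's
-- # incremental dict accumulation.
--
-- _CODES = {
--     'default': (0,),
--     'black': (30,),
--     'red': (31,),
--     'yellow': (33,),
--     'green': (32,),
--     'cyan': (36,),
--     'blue': (34,),
--     'magenta': (35,),
--     'pink': (35,),
--     'white': (37,),
--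
--     'gray': (90,),
--     'lred': (91,),
--     'lyellow': (93,),
--     'lgreen': (92,),
--     'lcyan': (96,),
--     'lblue': (94,),
--     'lmagenta': (95,),
--     'lpink': (95,),
--     'lwhite': (97,),
--
--     'iblack': (40, 97),
--     'ired': (41, 97),
--     'iyellow': (43, 97),
--     'igreen': (42, 97),
--     'icyan': (46, 97),
--     'iblue': (44, 97),
--     'imagenta': (45, 97),
--     'ipink': (45, 97),
--     'iwhite': (47, 30),
--
--     'igray': (100, 97),
--     'ilred': (101, 30),
--     'ilyellow': (103, 30),
--     'ilgreen': (102, 30),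
--     'ilcyan': (106, 30),
--     'ilblue': (104, 30),
--     'ilmagenta': (105, 30),
--     'ilpink': (105, 30),
--     'ilwhite': (107, 30),
-- }
--
--
-- class UnknowColor(Exception):
--     """Unknown color error"""
--     def __init__(self, color):
--         super().__init__("Unknown color: " + color)
--
--
-- def _resolve(color):
--     """First code-table entry whose name starts with color.lower(), rendered as ANSI escapes."""
--     low = color.lower()
--     for name, codes in _CODES.items():
--         if name.startswith(low):
--             return ''.join('\033[%dm' % c for c in codes)
--     raise UnknowColor(color)
--
--
-- def action_decode(actions):
--     """Decode actions: resolve every color first, then group per distinct color value."""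
--     resolved = [(_resolve(color), pattern) for color, pattern in actions]
--     keys = list(dict.fromkeys(v for v, _ in resolved))
--     return {k: [p for v, p in resolved if v == k] for k in keys}
-- ===== Notes on version B (the rewrite author's own statement) =====
-- stated objective: alternative
-- what changed: B stores the color table as numeric SGR codes and renders '\033[<n>m' values at resolution, and replaces A's single-pass incremental dict accumulation (membership test then insert-or-append per action) with a staged resolve-all / dedup-keys / one-filter-per-distinct-value grouping.
import Mathlib
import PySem

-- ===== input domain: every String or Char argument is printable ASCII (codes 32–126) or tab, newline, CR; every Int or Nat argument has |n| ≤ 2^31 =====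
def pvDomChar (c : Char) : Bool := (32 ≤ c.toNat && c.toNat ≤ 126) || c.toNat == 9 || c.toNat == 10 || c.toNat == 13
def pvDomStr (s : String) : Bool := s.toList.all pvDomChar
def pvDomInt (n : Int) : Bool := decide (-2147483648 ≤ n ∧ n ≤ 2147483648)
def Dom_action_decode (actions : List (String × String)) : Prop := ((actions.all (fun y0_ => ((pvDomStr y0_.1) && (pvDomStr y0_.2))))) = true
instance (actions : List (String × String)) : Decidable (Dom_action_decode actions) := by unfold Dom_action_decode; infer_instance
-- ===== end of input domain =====

-- B keeps the color table as numeric SGR codes (rendering "\033[<n>m" values on resolution) and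
-- replaces A's incremental dict accumulation by resolve-all / dedup-keys / filter grouping
-- (objective: alternative decomposition, no speed claim).

-- ===== PORT A =====
-- the module-level COLORS dict (used only via ordered iteration in get_color)
def pvColors : List (String × String) := [
  ("default", "\x1b[0m"),
  ("black", "\x1b[30m"),
  ("red", "\x1b[31m"),
  ("yellow", "\x1b[33m"),
  ("green", "\x1b[32m"),
  ("cyan", "\x1b[36m"),
  ("blue", "\x1b[34m"),
  ("magenta", "\x1b[35m"),
  ("pink", "\x1b[35m"),
  ("white", "\x1b[37m"),
  ("gray", "\x1b[90m"),
  ("lred", "\x1b[91m"),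
  ("lyellow", "\x1b[93m"),
  ("lgreen", "\x1b[92m"),
  ("lcyan", "\x1b[96m"),
  ("lblue", "\x1b[94m"),
  ("lmagenta", "\x1b[95m"),
  ("lpink", "\x1b[95m"),
  ("lwhite", "\x1b[97m"),
  ("iblack", "\x1b[40m\x1b[97m"),
  ("ired", "\x1b[41m\x1b[97m"),
  ("iyellow", "\x1b[43m\x1b[97m"),
  ("igreen", "\x1b[42m\x1b[97m"),
  ("icyan", "\x1b[46m\x1b[97m"),
  ("iblue", "\x1b[44m\x1b[97m"),
  ("imagenta", "\x1b[45m\x1b[97m"),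
  ("ipink", "\x1b[45m\x1b[97m"),
  ("iwhite", "\x1b[47m\x1b[30m"),
  ("igray", "\x1b[100m\x1b[97m"),
  ("ilred", "\x1b[101m\x1b[30m"),
  ("ilyellow", "\x1b[103m\x1b[30m"),
  ("ilgreen", "\x1b[102m\x1b[30m"),
  ("ilcyan", "\x1b[106m\x1b[30m"),
  ("ilblue", "\x1b[104m\x1b[30m"),
  ("ilmagenta", "\x1b[105m\x1b[30m"),
  ("ilpink", "\x1b[105m\x1b[30m"),
  ("ilwhite", "\x1b[107m\x1b[30m")]

-- get_color: first COLORS entry whose name starts with color.lower(); none = UnknowColor (raise)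
def pvGetColor? (color : String) : Option String :=
  (pvColors.find? (fun nv => PySem.Str.startswith nv.1 (PySem.Str.lower color))).map (fun nv => nv.2)

-- total form of get_color, used only under Pre_ (which rules out the none case)
def pvColorD (color : String) : String := (pvGetColor? color).getD ""

def action_decode (actions : List (String × String)) : List (String × List String) :=
  (actions.foldl
    (fun (d : PySem.Dict String (List String)) cp =>
      let cv := pvColorD cp.1
      if d.contains cv = false then d.insert cv [cp.2]
      else d.modify cv [] (fun l => l ++ [cp.2]))
    PySem.Dict.empty).items

-- ===== PORT B =====
-- Source B's _CODES table: numeric SGR codes per name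
def pvCodes : List (String × List Int) := [
  ("default", [0]),
  ("black", [30]),
  ("red", [31]),
  ("yellow", [33]),
  ("green", [32]),
  ("cyan", [36]),
  ("blue", [34]),
  ("magenta", [35]),
  ("pink", [35]),
  ("white", [37]),
  ("gray", [90]),
  ("lred", [91]),
  ("lyellow", [93]),
  ("lgreen", [92]),
  ("lcyan", [96]),
  ("lblue", [94]),
  ("lmagenta", [95]),
  ("lpink", [95]),
  ("lwhite", [97]),
  ("iblack", [40, 97]),
  ("ired", [41, 97]),
  ("iyellow", [43, 97]),
  ("igreen", [42, 97]),
  ("icyan", [46, 97]),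
  ("iblue", [44, 97]),
  ("imagenta", [45, 97]),
  ("ipink", [45, 97]),
  ("iwhite", [47, 30]),
  ("igray", [100, 97]),
  ("ilred", [101, 30]),
  ("ilyellow", [103, 30]),
  ("ilgreen", [102, 30]),
  ("ilcyan", [106, 30]),
  ("ilblue", [104, 30]),
  ("ilmagenta", [105, 30]),
  ("ilpink", [105, 30]),
  ("ilwhite", [107, 30])]

-- ''.join('\033[%dm' % c for c in codes)
def pvRender (codes : List Int) : String :=
  PySem.Str.join "" (codes.map (fun c => "\x1b[" ++ PySem.Int.toStr c ++ "m"))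

-- _resolve: first code-table entry whose name starts with color.lower(), rendered; none = raise
def pvResolve? (color : String) : Option String :=
  (pvCodes.find? (fun nc => PySem.Str.startswith nc.1 (PySem.Str.lower color))).map
    (fun nc => pvRender nc.2)

-- total form of _resolve, used only under Pre_ (which rules out the none case)
def pvResolveD (color : String) : String := (pvResolve? color).getD ""

def action_decode_alt (actions : List (String × String)) : List (String × List String) :=
  let resolved := actions.map (fun cp => (pvResolveD cp.1, cp.2))
  let keys := PySem.List.dedup (resolved.map (fun p => p.1))
  keys.map (fun key => (key, (resolved.filter (fun p => p.1 == key)).map (fun p => p.2)))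

-- ===== PRECONDITION & SPEC =====
-- Pre_ excludes exactly the inputs on which get_color (hence A and B alike) raises UnknowColor:
-- some action's color, lowercased, is a prefix of no COLORS key.
def Pre_action_decode (actions : List (String × String)) : Prop :=
  ∀ cp ∈ actions, ∃ nv ∈ pvColors, PySem.Str.startswith nv.1 (PySem.Str.lower cp.1) = true
instance (actions : List (String × String)) : Decidable (Pre_action_decode actions) := by
  unfold Pre_action_decode; infer_instance

def pvWitness_action_decode : (List (String × String)) := [("red", "err.*"), ("RED", "fail"), ("b", "warn")]

def Spec_action_decode (actions : List (String × String)) (out : List (String × List String)) : Prop := out = action_decode_alt actions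
instance (actions : List (String × String)) (out : List (String × List String)) : Decidable (Spec_action_decode actions out) := by unfold Spec_action_decode; infer_instance

-- ===== CLAIM (what is proved, stated in full; the proofs are below) =====
def Claim_equal_action_decode : Prop := ∀ (actions : List (String × String)), Dom_action_decode actions → Pre_action_decode actions → Spec_action_decode actions (action_decode actions)

-- ===== LEMMAS AND PROOFS =====

-- A's string table is exactly B's code table rendered entrywise
theorem pv_colors_eq :
    pvColors = pvCodes.map (fun nc => (nc.1, pvRender nc.2)) := by decide

-- hence the two resolution helpers agree on every string
theorem pv_resolve_eq (color : String) : pvColorD color = pvResolveD color := by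
  unfold pvColorD pvResolveD pvGetColor? pvResolve?
  rw [pv_colors_eq, List.find?_map]
  cases h : pvCodes.find? ((fun nv : String × String => PySem.Str.startswith nv.1 (PySem.Str.lower color)) ∘ (fun nc : String × List Int => (nc.1, pvRender nc.2))) with
  | none =>
      have h' : pvCodes.find? (fun nc : String × List Int => PySem.Str.startswith nc.1 (PySem.Str.lower color)) = none := h
      rw [h']; rfl
  | some v =>
      have h' : pvCodes.find? (fun nc : String × List Int => PySem.Str.startswith nc.1 (PySem.Str.lower color)) = some v := h
      rw [h']; rfl

-- A's branch (insert a fresh singleton / append to the existing list) is, in either case, one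
-- Dict.modify with default [].
theorem pv_step_eq (d : PySem.Dict String (List String)) (cp : String × String) :
    (if d.contains (pvColorD cp.1) = false then d.insert (pvColorD cp.1) [cp.2]
     else d.modify (pvColorD cp.1) [] (fun l => l ++ [cp.2]))
    = d.modify (pvColorD cp.1) [] (fun l => l ++ [cp.2]) := by
  by_cases h : d.contains (pvColorD cp.1) = false
  · simp [h, PySem.Dict.modify, PySem.Dict.getD_of_not_contains]
  · simp [h]

-- the whole equivalence (it holds for the total ports even without Pre_)
theorem pv_main (actions : List (String × String)) :
    action_decode actions = action_decode_alt actions := by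
  unfold action_decode action_decode_alt
  have hres : (fun (cp : String × String) => (pvResolveD cp.1, cp.2))
      = (fun cp => (pvColorD cp.1, cp.2)) :=
    funext fun cp => by rw [pv_resolve_eq]
  rw [hres]
  have hstep : (fun (d : PySem.Dict String (List String)) (cp : String × String) =>
      let cv := pvColorD cp.1
      if d.contains cv = false then d.insert cv [cp.2]
      else d.modify cv [] (fun l => l ++ [cp.2]))
      = (fun d cp => d.modify (pvColorD cp.1) [] (fun l => l ++ [cp.2])) :=
    funext fun d => funext fun cp => pv_step_eq d cp
  rw [hstep]
  have hmap : actions.foldl (fun (d : PySem.Dict String (List String)) cp =>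
        d.modify (pvColorD cp.1) [] (fun l => l ++ [cp.2])) PySem.Dict.empty
      = (actions.map (fun cp => (pvColorD cp.1, cp.2))).foldl
        (fun d p => d.modify p.1 [] (fun l => l ++ [p.2])) PySem.Dict.empty := by
    rw [List.foldl_map]
  rw [hmap]
  set rs := actions.map (fun cp => (pvColorD cp.1, cp.2)) with hrs
  set D := rs.foldl (fun (d : PySem.Dict String (List String)) p =>
    d.modify p.1 [] (fun l => l ++ [p.2])) PySem.Dict.empty with hD
  have hnd : D.keys.Nodup := by
    rw [hD]
    exact PySem.Dict.nodup_keys_foldl_modify_key rs (fun p => p.1) []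
      (fun d p => fun l => l ++ [p.2]) PySem.Dict.empty (by simp)
  have hkeys : D.keys = PySem.List.dedup (rs.map (fun p => p.1)) := by
    rw [hD]
    rw [PySem.Dict.keys_foldl_modify_key rs (fun p => p.1) []
      (fun d p => fun l => l ++ [p.2]) PySem.Dict.empty]
    simp [PySem.Set.update_nil_left]
  have hget : ∀ c, D.getD c [] = (rs.filter (fun p => p.1 == c)).map (fun p => p.2) := by
    intro c
    rw [hD, PySem.Dict.getD_foldl_modify_append rs PySem.Dict.empty c]
    simp
  rw [PySem.Dict.items_eq_map_keys D hnd [], hkeys]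
  exact List.map_congr_left (fun k _ => by rw [hget k])

-- ===== VERDICT (by name: the statement is the Claim_ definition above) =====
theorem action_decode_spec : Claim_equal_action_decode := by
  intro actions _ _
  unfold Spec_action_decode
  exact pv_main actions
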